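-- pv_equiv track=rewrite | github.com/mazdik/mazdik.github.io | blog/notes/Python/rows_to_cols.py | pivot_keys
-- ===== SOURCE A (Python) =====
-- from typing import List
--
-- def key_string_values(row: dict, keys: List[str]) -> str:
--     return ','.join(map(lambda x: str(row[x]), keys))
--
-- def pivot_keys(rows: list, group_keys: List[str], column_key: str, value_key: str, column_prefix: str) -> list:
--     res = {}
--     for row in rows:
--         key = key_string_values(row, group_keys)
--         if key not in res:
--             res[key] = {}
--             for group_key in group_keys:
--                 res[key][group_key] = row[group_key]
--
--         field = column_prefix + str(row[column_key]) if column_prefix else row[column_key]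
--         res[key][field] = row[value_key]
--
--     return list(res.values())
-- ===== SOURCE B (Python) =====
-- def pivot_keys(rows: list, group_keys, column_key: str, value_key: str, column_prefix: str) -> list:
--     # Pass 1: materialise the grouping — composite key -> list of member rows, in first-appearance order.
--     groups = {}
--     for row in rows:
--         key = ','.join(str(row[k]) for k in group_keys)
--         groups.setdefault(key, []).append(row)
--     # Pass 2: pivot each group independently.
--     result = []
--     for grp in groups.values():
--         first = grp[0]
--         out = {k: first[k] for k in group_keys}
--         for row in grp:
--             field = column_prefix + str(row[column_key]) if column_prefix else row[column_key]
--             out[field] = row[value_key]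
--         result.append(out)
--     return result
-- ===== Notes on version B (the rewrite author's own statement) =====
-- stated objective: alternative
-- what changed: Replaces the fused single loop that pivots while grouping with two separate passes: first a grouping table mapping each composite key to its list of rows, then a pivot of each completed group, taking group-key columns from the group's first row.
import Mathlib
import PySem

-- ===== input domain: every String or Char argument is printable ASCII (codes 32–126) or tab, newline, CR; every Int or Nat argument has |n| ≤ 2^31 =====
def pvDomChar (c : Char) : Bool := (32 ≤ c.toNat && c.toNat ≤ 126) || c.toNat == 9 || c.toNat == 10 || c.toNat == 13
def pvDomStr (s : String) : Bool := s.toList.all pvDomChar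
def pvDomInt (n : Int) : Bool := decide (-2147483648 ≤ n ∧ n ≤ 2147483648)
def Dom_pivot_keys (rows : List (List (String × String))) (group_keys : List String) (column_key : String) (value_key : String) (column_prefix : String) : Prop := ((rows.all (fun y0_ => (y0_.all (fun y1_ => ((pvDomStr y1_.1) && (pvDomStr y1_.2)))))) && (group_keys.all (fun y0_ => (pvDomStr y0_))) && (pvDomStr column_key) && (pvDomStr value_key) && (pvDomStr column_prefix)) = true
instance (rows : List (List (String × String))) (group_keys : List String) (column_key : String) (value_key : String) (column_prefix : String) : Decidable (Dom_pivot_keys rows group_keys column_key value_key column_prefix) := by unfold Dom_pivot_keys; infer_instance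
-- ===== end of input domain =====

-- B restructures A's fused group-and-pivot loop into two separate passes (group first, then pivot
-- each completed group); same cost, alternative decomposition. Values are strings, so Python's
-- str(row[x]) is the identity and is ported as the plain lookup.

-- ===== PORT A =====
-- row[x] (KeyError on a missing key) is ported as (row.get? x).getD ""; Pre_ admits only inputs
-- where every needed key is present, so the default is never taken on admitted inputs.
def key_string_values (row : PySem.Dict String String) (keys : List String) : String :=
  PySem.Str.join "," (keys.map (fun x => (row.get? x).getD ""))

-- loop body of A's single fused 'for row in rows' loop, as a named helper
def pivotStepA (group_keys : List String) (column_key : String) (value_key : String) (column_prefix : String) (res : PySem.Dict String (PySem.Dict String String)) (rowL : List (String × String)) : PySem.Dict String (PySem.Dict String String) :=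
  let row := PySem.Dict.mk rowL
  let key := key_string_values row group_keys
  let res := if res.contains key then res
    else res.insert key (group_keys.foldl (fun d gk => d.insert gk ((row.get? gk).getD "")) PySem.Dict.empty)
  let field := if column_prefix ≠ "" then column_prefix ++ ((row.get? column_key).getD "") else (row.get? column_key).getD ""
  res.insert key (((res.getD key PySem.Dict.empty)).insert field ((row.get? value_key).getD ""))

def pivot_keys (rows : List (List (String × String))) (group_keys : List String) (column_key : String) (value_key : String) (column_prefix : String) : List (List (String × String)) :=
  ((rows.foldl (pivotStepA group_keys column_key value_key column_prefix) PySem.Dict.empty).values).map (fun d => d.items)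

-- ===== PORT B =====
-- pass 1 loop body: groups.setdefault(key, []).append(row)
def groupStepB (group_keys : List String) (g : PySem.Dict String (List (List (String × String)))) (rowL : List (String × String)) : PySem.Dict String (List (List (String × String))) :=
  let key := PySem.Str.join "," (group_keys.map (fun x => ((PySem.Dict.mk rowL).get? x).getD ""))
  g.modify key [] (fun grp => grp ++ [rowL])

-- pass 2 body: pivot one completed group
def pivotGroupB (group_keys : List String) (column_key : String) (value_key : String) (column_prefix : String) (grp : List (List (String × String))) : List (String × String) :=
  match grp with
  | [] => []
  | first :: _ =>
    let out0 := group_keys.foldl (fun d k => d.insert k (((PySem.Dict.mk first).get? k).getD "")) PySem.Dict.empty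
    (grp.foldl (fun out rowL =>
      let row := PySem.Dict.mk rowL
      let field := if column_prefix ≠ "" then column_prefix ++ ((row.get? column_key).getD "") else (row.get? column_key).getD ""
      out.insert field ((row.get? value_key).getD "")) out0).items

def pivot_keys_alt (rows : List (List (String × String))) (group_keys : List String) (column_key : String) (value_key : String) (column_prefix : String) : List (List (String × String)) :=
  ((rows.foldl (groupStepB group_keys) PySem.Dict.empty).values).map (pivotGroupB group_keys column_key value_key column_prefix)

-- ===== PRECONDITION & SPEC =====
-- Pre_ excludes exactly the inputs where Python A raises KeyError: a row missing one of
-- group_keys, column_key or value_key.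
def Pre_pivot_keys (rows : List (List (String × String))) (group_keys : List String) (column_key : String) (value_key : String) (column_prefix : String) : Prop :=
  ∀ r ∈ rows, (∀ k ∈ group_keys, k ∈ r.map Prod.fst) ∧ column_key ∈ r.map Prod.fst ∧ value_key ∈ r.map Prod.fst

instance (rows : List (List (String × String))) (group_keys : List String) (column_key : String) (value_key : String) (column_prefix : String) : Decidable (Pre_pivot_keys rows group_keys column_key value_key column_prefix) := by unfold Pre_pivot_keys; infer_instance

def pvWitness_pivot_keys : (List (List (String × String))) × List String × String × String × String :=
  ([[("g", "1"), ("c", "a"), ("v", "x")], [("g", "1"), ("c", "b"), ("v", "y")]], ["g"], "c", "v", "p_")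

def Spec_pivot_keys (rows : List (List (String × String))) (group_keys : List String) (column_key : String) (value_key : String) (column_prefix : String) (out : List (List (String × String))) : Prop := out = pivot_keys_alt rows group_keys column_key value_key column_prefix
instance (rows : List (List (String × String))) (group_keys : List String) (column_key : String) (value_key : String) (column_prefix : String) (out : List (List (String × String))) : Decidable (Spec_pivot_keys rows group_keys column_key value_key column_prefix out) := by unfold Spec_pivot_keys; infer_instance

-- ===== CLAIM (what is proved, stated in full; the proofs are below) =====
def Claim_equal_pivot_keys : Prop := ∀ (rows : List (List (String × String))) (group_keys : List String) (column_key : String) (value_key : String) (column_prefix : String), Dom_pivot_keys rows group_keys column_key value_key column_prefix → Pre_pivot_keys rows group_keys column_key value_key column_prefix → Spec_pivot_keys rows group_keys column_key value_key column_prefix (pivot_keys rows group_keys column_key value_key column_prefix)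

-- ===== LEMMAS AND PROOFS =====

-- the inner pivot dict of one group, built the way both programs build it
def pvPG (group_keys : List String) (column_key : String) (value_key : String) (column_prefix : String) (grp : List (List (String × String))) : PySem.Dict String String :=
  match grp with
  | [] => PySem.Dict.empty
  | first :: _ =>
    grp.foldl (fun out rowL =>
      let row := PySem.Dict.mk rowL
      let field := if column_prefix ≠ "" then column_prefix ++ ((row.get? column_key).getD "") else (row.get? column_key).getD ""
      out.insert field ((row.get? value_key).getD ""))
      (group_keys.foldl (fun d k => d.insert k (((PySem.Dict.mk first).get? k).getD "")) PySem.Dict.empty)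
theorem pivotGroupB_eq_pvPG (gks : List String) (ck vk cp : String) (grp : List (List (String × String))) :
    pivotGroupB gks ck vk cp grp = (pvPG gks ck vk cp grp).items := by
  cases grp <;> rfl

theorem pvPG_append (gks : List String) (ck vk cp : String) (grp : List (List (String × String))) (r : List (String × String)) (h : grp ≠ []) :
    pvPG gks ck vk cp (grp ++ [r]) =
      (pvPG gks ck vk cp grp).insert
        (if cp ≠ "" then cp ++ (((PySem.Dict.mk r).get? ck).getD "") else ((PySem.Dict.mk r).get? ck).getD "")
        (((PySem.Dict.mk r).get? vk).getD "") :=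
  by cases grp with
  | nil => exact absurd rfl h
  | cons r0 rest => simp [pvPG, List.foldl_append]
theorem modify_eq_insert_getD {ν : Type} (d : PySem.Dict String ν) (k : String) (d0 : ν) (f : ν → ν) :
    d.modify k d0 f = d.insert k (f (d.getD k d0)) := by
  simp [PySem.Dict.modify, PySem.Dict.insert, PySem.Dict.getD]
theorem contains_map_fst {ν μ : Type} (g : PySem.Dict String ν) (f : ν → μ) (k : String) :
    (PySem.Dict.mk (g.items.map (fun p => (p.1, f p.2)))).contains k = g.contains k := by
  cases g with
  | mk l => simp [PySem.Dict.contains, List.any_map]; rfl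

theorem pvStep_image (gks : List String) (ck vk cp : String)
    (g : PySem.Dict String (List (List (String × String)))) (r : List (String × String))
    (hnd : g.keys.Nodup) (hne : ∀ p ∈ g.items, p.2 ≠ []) :
    pivotStepA gks ck vk cp (PySem.Dict.mk (g.items.map (fun p => (p.1, pvPG gks ck vk cp p.2)))) r
      = PySem.Dict.mk ((groupStepB gks g r).items.map (fun p => (p.1, pvPG gks ck vk cp p.2))) := by
  have hgB : groupStepB gks g r
      = g.insert (key_string_values (PySem.Dict.mk r) gks)
          ((g.getD (key_string_values (PySem.Dict.mk r) gks) []) ++ [r]) := by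
    unfold groupStepB
    exact modify_eq_insert_getD g _ [] _
  rw [hgB]
  have hdnd : (PySem.Dict.mk (g.items.map (fun p => (p.1, pvPG gks ck vk cp p.2)))).keys.Nodup := by
    cases g with
    | mk l => simpa [PySem.Dict.keys, List.map_map] using hnd
  have hcont := contains_map_fst g (pvPG gks ck vk cp) (key_string_values (PySem.Dict.mk r) gks)
  by_cases hc : g.contains (key_string_values (PySem.Dict.mk r) gks) = true
  · obtain ⟨grp, hget⟩ : ∃ grp, g.get? (key_string_values (PySem.Dict.mk r) gks) = some grp := by
      have h := PySem.Dict.contains_eq_isSome_get? g (key_string_values (PySem.Dict.mk r) gks)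
      rw [hc] at h
      exact Option.isSome_iff_exists.mp h.symm
    have hmem : (key_string_values (PySem.Dict.mk r) gks, grp) ∈ g.items :=
      PySem.Dict.mem_items_of_get?_eq_some _ hget
    have hgrpne : grp ≠ [] := hne _ hmem
    have hgetD : g.getD (key_string_values (PySem.Dict.mk r) gks) [] = grp :=
      PySem.Dict.getD_of_mem_items _ hmem hnd []
    have hmem' : (key_string_values (PySem.Dict.mk r) gks, pvPG gks ck vk cp grp)
        ∈ (PySem.Dict.mk (g.items.map (fun p => (p.1, pvPG gks ck vk cp p.2)))).items :=
      List.mem_map.mpr ⟨(key_string_values (PySem.Dict.mk r) gks, grp), hmem, rfl⟩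
    have hdget : (PySem.Dict.mk (g.items.map (fun p => (p.1, pvPG gks ck vk cp p.2)))).getD
        (key_string_values (PySem.Dict.mk r) gks) PySem.Dict.empty = pvPG gks ck vk cp grp :=
      PySem.Dict.getD_of_mem_items _ hmem' hdnd _
    have hdc : (PySem.Dict.mk (g.items.map (fun p => (p.1, pvPG gks ck vk cp p.2)))).contains
        (key_string_values (PySem.Dict.mk r) gks) = true := by rw [hcont]; exact hc
    unfold pivotStepA
    simp only [hcont, hc, if_true, hdget, hgetD]
    apply PySem.Dict.ext
    rw [PySem.Dict.items_insert_of_contains _ _ hdc, PySem.Dict.items_insert_of_contains _ _ hc]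
    cases g with
    | mk l =>
      simp only [List.map_map]
      apply List.map_congr_left
      intro p hp
      by_cases hpk : p.1 = key_string_values (PySem.Dict.mk r) gks
      · have hp2 : p.2 = grp := by
          have h1 : (PySem.Dict.mk l).get? p.1 = some p.2 := PySem.Dict.get?_of_mem_items _ hp hnd
          rw [hpk, hget] at h1
          exact (Option.some_inj.mp h1).symm
        simp [Function.comp, hpk, hp2, pvPG_append gks ck vk cp grp r hgrpne]
      · simp [Function.comp, hpk]
  · have hc' : g.contains (key_string_values (PySem.Dict.mk r) gks) = false := by simpa using hc
    have hdc' : (PySem.Dict.mk (g.items.map (fun p => (p.1, pvPG gks ck vk cp p.2)))).contains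
        (key_string_values (PySem.Dict.mk r) gks) = false := by rw [hcont]; exact hc'
    have hgetD : g.getD (key_string_values (PySem.Dict.mk r) gks) [] = [] :=
      PySem.Dict.getD_of_not_contains _ _ hc'
    unfold pivotStepA
    simp only [hcont, hc', if_false, Bool.false_eq_true]
    rw [PySem.Dict.getD_insert_self, PySem.Dict.insert_insert_self]
    apply PySem.Dict.ext
    rw [PySem.Dict.items_insert_of_not_contains _ _ hdc', hgetD,
        PySem.Dict.items_insert_of_not_contains _ _ hc']
    simp [pvPG]

theorem pvMain (gks : List String) (ck vk cp : String) (rows : List (List (String × String)))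
    (g : PySem.Dict String (List (List (String × String))))
    (hnd : g.keys.Nodup) (hne : ∀ p ∈ g.items, p.2 ≠ []) :
    rows.foldl (pivotStepA gks ck vk cp) (PySem.Dict.mk (g.items.map (fun p => (p.1, pvPG gks ck vk cp p.2))))
      = PySem.Dict.mk ((rows.foldl (groupStepB gks) g).items.map (fun p => (p.1, pvPG gks ck vk cp p.2))) := by
  induction rows generalizing g with
  | nil => rfl
  | cons r rest ih =>
    have hgB : groupStepB gks g r
        = g.insert (key_string_values (PySem.Dict.mk r) gks)
            ((g.getD (key_string_values (PySem.Dict.mk r) gks) []) ++ [r]) := by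
      unfold groupStepB
      exact modify_eq_insert_getD g _ [] _
    have hnd' : (groupStepB gks g r).keys.Nodup := by
      rw [hgB]; exact PySem.Dict.nodup_keys_insert _ _ _ hnd
    have hne' : ∀ p ∈ (groupStepB gks g r).items, p.2 ≠ [] := by
      rw [hgB]
      intro p hp
      rcases (PySem.Dict.mem_items_insert _ _ _ _).mp hp with h | h
      · subst h; simp
      · exact hne _ h.1
    simp only [List.foldl_cons]
    rw [pvStep_image gks ck vk cp g r hnd hne]
    exact ih (groupStepB gks g r) hnd' hne'

theorem pvFinal (rows : List (List (String × String))) (gks : List String) (ck vk cp : String) :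
    ((rows.foldl (pivotStepA gks ck vk cp) PySem.Dict.empty).values).map (fun d => d.items)
      = ((rows.foldl (groupStepB gks) PySem.Dict.empty).values).map (fun grp => pvPG gks ck vk cp grp |>.items) := by
  have h := pvMain gks ck vk cp rows PySem.Dict.empty (by simp [PySem.Dict.empty, PySem.Dict.keys]) (by simp [PySem.Dict.empty])
  have he : PySem.Dict.mk ((PySem.Dict.empty : PySem.Dict String (List (List (String × String)))).items.map (fun p => (p.1, pvPG gks ck vk cp p.2))) = (PySem.Dict.empty : PySem.Dict String (PySem.Dict String String)) := rfl
  rw [he] at h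
  rw [h]
  cases rows.foldl (groupStepB gks) PySem.Dict.empty with
  | mk l => simp [PySem.Dict.values, List.map_map]

-- ===== VERDICT (by name: the statement is the Claim_ definition above) =====
theorem pivot_keys_spec : Claim_equal_pivot_keys := by
  intro rows gks ck vk cp _ _
  unfold Spec_pivot_keys pivot_keys pivot_keys_alt
  rw [pvFinal rows gks ck vk cp]
  apply List.map_congr_left
  intro grp _
  exact (pivotGroupB_eq_pvPG gks ck vk cp grp).symm
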